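-- pv_equiv track=rewrite | github.com/bobergda/locaLLM-bench | runner.py | _split_thinking_tags
-- ===== SOURCE A (Python) =====
-- _THINKING_START_TAGS = ("<think>", "<thinking>")
--
-- _THINKING_END_TAGS = ("</think>", "</thinking>")
--
-- def _find_next_tag(text: str, tags: tuple[str, ...], start: int) -> tuple[int, str | None]:
--     idx = -1
--     found = None
--     for tag in tags:
--         pos = text.find(tag, start)
--         if pos != -1 and (idx == -1 or pos < idx):
--             idx = pos
--             found = tag
--     return idx, found
--
-- def _longest_tag_prefix_suffix(text: str, tags: tuple[str, ...]) -> int: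
--     max_len = 0
--     for tag in tags:
--         limit = min(len(tag) - 1, len(text))
--         for i in range(1, limit + 1):
--             if text.endswith(tag[:i]) and i > max_len:
--                 max_len = i
--     return max_len
--
-- def _split_thinking_tags(
--     text: str,
--     in_thinking: bool,
--     pending_tag: str,
-- ) -> tuple[list[tuple[str, str]], bool, str]:
--     data = pending_tag + text
--     if not data:
--         return [], in_thinking, ""
--     lower = data.lower()
--     segments: list[tuple[str, str]] = []
--     pos = 0
--     while True:
--         if in_thinking:
--             idx, tag = _find_next_tag(lower, _THINKING_END_TAGS, pos)
--             if idx == -1: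
--                 break
--             if idx > pos:
--                 segments.append(("thinking", data[pos:idx]))
--             pos = idx + len(tag)
--             in_thinking = False
--         else:
--             idx, tag = _find_next_tag(lower, _THINKING_START_TAGS, pos)
--             if idx == -1:
--                 break
--             if idx > pos:
--                 segments.append(("response", data[pos:idx]))
--             pos = idx + len(tag)
--             in_thinking = True
--
--     remainder = data[pos:]
--     if remainder:
--         tags = _THINKING_END_TAGS if in_thinking else _THINKING_START_TAGS
--         pending_len = _longest_tag_prefix_suffix(remainder.lower(), tags)
--         if pending_len:
--             pending_tag = remainder[-pending_len:]
--             remainder = remainder[:-pending_len]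
--         else:
--             pending_tag = ""
--         if remainder:
--             segments.append(("thinking" if in_thinking else "response", remainder))
--     else:
--         pending_tag = ""
--     return segments, in_thinking, pending_tag
-- ===== SOURCE B (Python) =====
-- _THINKING_START_TAGS = ("<think>", "<thinking>")
--
-- _THINKING_END_TAGS = ("</think>", "</thinking>")
--
-- def _longest_tag_prefix_suffix(text, tags):
--     max_len = 0
--     for tag in tags:
--         limit = min(len(tag) - 1, len(text))
--         for i in range(1, limit + 1):
--             if text.endswith(tag[:i]) and i > max_len:
--                 max_len = i
--     return max_len
--
-- def _split_thinking_tags(text, in_thinking, pending_tag):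
--     # single left-to-right character scan with a state machine instead of
--     # repeated find() jumps per tag set
--     data = pending_tag + text
--     lower = data.lower()
--     segments = []
--     seg_start = 0
--     i = 0
--     n = len(data)
--     while i < n:
--         expected = _THINKING_END_TAGS if in_thinking else _THINKING_START_TAGS
--         hit = next((t for t in expected if lower.startswith(t, i)), None)
--         if hit is None:
--             i += 1
--             continue
--         if i > seg_start:
--             segments.append(("thinking" if in_thinking else "response", data[seg_start:i]))
--         i += len(hit)
--         seg_start = i
--         in_thinking = not in_thinking
--     remainder = data[seg_start:]
--     if remainder:
--         tags = _THINKING_END_TAGS if in_thinking else _THINKING_START_TAGS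
--         pending_len = _longest_tag_prefix_suffix(remainder.lower(), tags)
--         pending_tag = remainder[-pending_len:] if pending_len else ""
--         remainder = remainder[:-pending_len] if pending_len else remainder
--         if remainder:
--             segments.append(("thinking" if in_thinking else "response", remainder))
--     else:
--         pending_tag = ""
--     return segments, in_thinking, pending_tag
-- ===== Notes on version B (the rewrite author's own statement) =====
-- stated objective: alternative
-- what changed: A repeatedly calls str.find for each tag of the currently-expected set and jumps between matches; B runs one left-to-right character scan as a state machine, testing the expected tags by startswith at each position, with the same shared pending-suffix helper for the tail.
import Mathlib
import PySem

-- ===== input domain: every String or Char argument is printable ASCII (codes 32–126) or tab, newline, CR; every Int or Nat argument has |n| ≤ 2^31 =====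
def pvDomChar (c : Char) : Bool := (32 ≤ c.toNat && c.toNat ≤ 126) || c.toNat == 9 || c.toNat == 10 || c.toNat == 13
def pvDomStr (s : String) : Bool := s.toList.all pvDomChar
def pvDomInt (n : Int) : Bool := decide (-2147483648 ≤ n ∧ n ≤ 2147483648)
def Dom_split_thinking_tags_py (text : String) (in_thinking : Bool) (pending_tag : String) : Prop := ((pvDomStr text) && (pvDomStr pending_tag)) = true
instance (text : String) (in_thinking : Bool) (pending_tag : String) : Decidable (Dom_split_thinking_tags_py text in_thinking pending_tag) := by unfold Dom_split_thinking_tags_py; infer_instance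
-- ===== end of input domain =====

-- B replaces A's repeated find()-and-jump alternation by a single left-to-right
-- character scan (state machine); the post-loop pending-tag code is shared verbatim.

-- ===== PORT A =====
-- module constants _THINKING_START_TAGS / _THINKING_END_TAGS (shared by both ports)
def pvStartTags : List (List Char) := ["<think>".toList, "<thinking>".toList]
def pvEndTags : List (List Char) := ["</think>".toList, "</thinking>".toList]
-- the segment label and the tag tuple selected by the current in_thinking flag
def pvLabel (inT : Bool) : String := if inT then "thinking" else "response"
def pvTags (inT : Bool) : List (List Char) := if inT then pvEndTags else pvStartTags

-- _find_next_tag: the for-loop over tags, accumulator (idx, found) starting (-1, None).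
-- `text.find(tag, start)` is taken on the suffix text[start:] (both ports track the
-- position as a suffix), so the index returned is relative to that suffix; exact.
def findNextTag (lower : List Char) : List (List Char) → Int × Option (List Char) → Int × Option (List Char)
  | [], st => st
  | tag :: rest, st =>
    let pos := PySem.Chars.find lower tag
    findNextTag lower rest (if pos ≠ -1 ∧ (st.1 = -1 ∨ pos < st.1) then (pos, some tag) else st)

-- _longest_tag_prefix_suffix (textually identical helper in A and in B)
def longestTagPrefixSuffix (text : List Char) (tags : List (List Char)) : Int :=
  tags.foldl (fun maxLen tag =>
    (PySem.List.pyRange 1 (↑(min (tag.length - 1) text.length) + 1)).foldl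
      (fun m i =>
        -- i ranges over 1..limit with limit ≤ len(tag)-1, so tag[:i] = tag.take i.toNat, exact
        if PySem.Chars.endswith text (tag.take i.toNat) && decide (m < i) then i else m)
      maxLen) 0

-- the post-loop remainder/pending block (textually identical in A and in B)
def tailFinish (segs : List (String × String)) (inT : Bool) (rem : List Char) :
    (List (String × String)) × Bool × String :=
  if rem ≠ [] then
    let plen := longestTagPrefixSuffix (PySem.Chars.lower rem) (pvTags inT)
    -- for 0 < plen: rem[-plen:] = drop (len-plen), rem[:-plen] = take (len-plen); exact
    let pend : List Char := if plen ≠ 0 then rem.drop (rem.length - plen.toNat) else []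
    let rem' : List Char := if plen ≠ 0 then rem.take (rem.length - plen.toNat) else rem
    (if rem' ≠ [] then segs ++ [(pvLabel inT, String.ofList rem')] else segs, inT, String.ofList pend)
  else (segs, inT, "")

-- facts cited by loopA's decreasing_by
theorem pvFindNextTag_pair (lower t1 t2 : List Char) :
    findNextTag lower [t1, t2] (-1, none) =
      (if PySem.Chars.find lower t1 = -1 then
        (if PySem.Chars.find lower t2 = -1 then ((-1 : Int), (none : Option (List Char)))
         else (PySem.Chars.find lower t2, some t2))
      else if PySem.Chars.find lower t2 ≠ -1 ∧ PySem.Chars.find lower t2 < PySem.Chars.find lower t1 then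
        (PySem.Chars.find lower t2, some t2)
      else (PySem.Chars.find lower t1, some t1)) := by
  have h1 := PySem.Chars.neg_one_le_find lower t1
  have h2 := PySem.Chars.neg_one_le_find lower t2
  simp only [findNextTag]
  split_ifs <;> simp_all

theorem pvFindNextTag_some (lower : List Char) (inT : Bool) (idx : Int) (tag : List Char)
    (h : findNextTag lower (pvTags inT) (-1, none) = (idx, some tag)) (hne : idx ≠ -1) :
    0 ≤ idx ∧ 0 < tag.length ∧ PySem.Chars.find lower tag = idx ∧ 0 < lower.length := by
  have hlen : ∀ t ∈ pvTags inT, 0 < t.length := by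
    cases inT <;> simp [pvTags, pvStartTags, pvEndTags]
  obtain ⟨t1, t2, hT⟩ : ∃ t1 t2, pvTags inT = [t1, t2] := by
    cases inT <;> exact ⟨_, _, rfl⟩
  rw [hT, pvFindNextTag_pair] at h
  have h1 := PySem.Chars.neg_one_le_find lower t1
  have h2 := PySem.Chars.neg_one_le_find lower t2
  have m1 : t1 ∈ pvTags inT := by rw [hT]; simp
  have m2 : t2 ∈ pvTags inT := by rw [hT]; simp
  have key : (0 ≤ idx ∧ PySem.Chars.find lower tag = idx) ∧ tag ∈ pvTags inT := by
    split_ifs at h with hA hB hC <;> simp only [Prod.mk.injEq] at h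
    · exact absurd h.2 (by simp)
    · obtain ⟨hi, hs⟩ := h
      injection hs with hs
      subst hs; subst hi
      exact ⟨⟨by omega, rfl⟩, m2⟩
    · obtain ⟨hi, hs⟩ := h
      injection hs with hs
      subst hs; subst hi
      exact ⟨⟨by omega, rfl⟩, m2⟩
    · obtain ⟨hi, hs⟩ := h
      injection hs with hs
      subst hs; subst hi
      exact ⟨⟨by omega, rfl⟩, m1⟩
  refine ⟨key.1.1, hlen _ key.2, key.1.2, ?_⟩
  have hinf : tag <:+: lower := (PySem.Chars.find_nonneg_iff lower tag).1 (by omega)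
  have hle := hinf.length_le
  have := hlen _ key.2
  omega

-- A's main while-loop over (segments, in_thinking, data[pos:], lower[pos:])
def loopA (segs : List (String × String)) (inT : Bool) (dRem lRem : List Char) :
    (List (String × String)) × Bool × String :=
  match hr : findNextTag lRem (pvTags inT) (-1, none) with
  | (idx, found) =>
    if hidx : idx = -1 then tailFinish segs inT dRem
    else
      match found with
      | some tag =>
        let segs' := if 0 < idx then segs ++ [(pvLabel inT, String.ofList (dRem.take idx.toNat))] else segs
        loopA segs' (!inT) (dRem.drop (idx.toNat + tag.length)) (lRem.drop (idx.toNat + tag.length))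
      | none => tailFinish segs inT dRem  -- unreachable: idx ≠ -1 forces found ≠ None
termination_by lRem.length
decreasing_by
  have := pvFindNextTag_some lRem inT idx tag hr hidx
  simp only [List.length_drop]
  omega

def split_thinking_tags_py (text : String) (in_thinking : Bool) (pending_tag : String) :
    (List (String × String)) × Bool × String :=
  let data := pending_tag.toList ++ text.toList
  if data.isEmpty then ([], in_thinking, "")
  else loopA [] in_thinking data (PySem.Chars.lower data)

-- ===== PORT B =====
-- fact cited by scanB's decreasing_by
theorem pvTags_len {inT : Bool} {t : List Char} (h : t ∈ pvTags inT) : 0 < t.length := by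
  cases inT <;> simp [pvTags, pvStartTags, pvEndTags] at h <;>
    rcases h with rfl | rfl <;> decide

-- B's single character-by-character scan: acc = data[seg_start:i], dRem/lRem = data/lower from i on
def scanB (acc : List Char) (segs : List (String × String)) (inT : Bool) (dRem lRem : List Char) :
    (List (String × String)) × Bool × String :=
  match lRem with
  | [] => tailFinish segs inT (acc ++ dRem)   -- loop exit: remainder = data[seg_start:]
  | c :: ls =>
    match hf : (pvTags inT).find? (fun t => PySem.Chars.startswith (c :: ls) t) with
    | some tag =>
      let segs' := if acc ≠ [] then segs ++ [(pvLabel inT, String.ofList acc)] else segs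
      scanB [] segs' (!inT) (dRem.drop tag.length) ((c :: ls).drop tag.length)
    | none => scanB (acc ++ dRem.take 1) segs inT (dRem.drop 1) ls
termination_by lRem.length
decreasing_by
  · have ht : tag ∈ pvTags inT := List.mem_of_find?_eq_some hf
    have := pvTags_len ht
    simp only [List.length_drop, List.length_cons]
    omega
  · simp

def split_thinking_tags_py_alt (text : String) (in_thinking : Bool) (pending_tag : String) :
    (List (String × String)) × Bool × String :=
  let data := pending_tag.toList ++ text.toList
  scanB [] [] in_thinking data (PySem.Chars.lower data)

-- ===== PRECONDITION & SPEC =====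
def Spec_split_thinking_tags_py (text : String) (in_thinking : Bool) (pending_tag : String) (out : (List (String × String)) × Bool × String) : Prop := out = split_thinking_tags_py_alt text in_thinking pending_tag
instance (text : String) (in_thinking : Bool) (pending_tag : String) (out : (List (String × String)) × Bool × String) : Decidable (Spec_split_thinking_tags_py text in_thinking pending_tag out) := by unfold Spec_split_thinking_tags_py; infer_instance

-- ===== CLAIM (what is proved, stated in full; the proofs are below) =====
def Claim_equal_split_thinking_tags_py : Prop := ∀ (text : String) (in_thinking : Bool) (pending_tag : String), Dom_split_thinking_tags_py text in_thinking pending_tag → Spec_split_thinking_tags_py text in_thinking pending_tag (split_thinking_tags_py text in_thinking pending_tag)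

-- ===== LEMMAS AND PROOFS =====

-- str.find unfolding facts
theorem pvFind_go_shift (sub : List Char) : ∀ (t : List Char) (k : Nat),
    PySem.Chars.find.go sub t k =
      if PySem.Chars.find.go sub t 0 = -1 then -1 else PySem.Chars.find.go sub t 0 + k := by
  intro t
  induction t with
  | nil => intro k; simp [PySem.Chars.find.go]; split_ifs <;> simp
  | cons c ls ih =>
    intro k
    by_cases hp : sub.isPrefixOf (c :: ls)
    · simp [PySem.Chars.find.go, hp]
    · simp only [PySem.Chars.find.go, hp, if_false, Bool.false_eq_true]
      have hb : -1 ≤ PySem.Chars.find.go sub ls 0 := PySem.Chars.neg_one_le_find ls sub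
      rw [ih (k+1), ih 1]
      split_ifs <;> omega

theorem pvFind_cons (c : Char) (ls sub : List Char) :
    PySem.Chars.find (c :: ls) sub =
      if sub.isPrefixOf (c :: ls) then 0
      else if PySem.Chars.find ls sub = -1 then -1 else PySem.Chars.find ls sub + 1 := by
  by_cases hp : sub.isPrefixOf (c :: ls)
  · simp [PySem.Chars.find, PySem.Chars.find.go, hp]
  · simp only [PySem.Chars.find, PySem.Chars.find.go, hp, if_false, Bool.false_eq_true]
    have hb : -1 ≤ PySem.Chars.find.go sub ls 0 := PySem.Chars.neg_one_le_find ls sub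
    rw [pvFind_go_shift sub ls 1]
    split_ifs <;> omega

theorem pvFind_nil_of_ne (sub : List Char) (h : sub ≠ []) : PySem.Chars.find [] sub = -1 := by
  simp [PySem.Chars.find, PySem.Chars.find.go, List.isEmpty_iff, h]

-- the first position (if any) at which a currently-expected tag starts
def pvFirstHit (inT : Bool) : List Char → Option (Nat × List Char)
  | [] => none
  | c :: ls =>
    match (pvTags inT).find? (fun t => PySem.Chars.startswith (c :: ls) t) with
    | some t => some (0, t)
    | none => (pvFirstHit inT ls).map (fun p => (p.1 + 1, p.2))

theorem pvFirstHit_spec (inT : Bool) : ∀ (l : List Char) (i : Nat) (t : List Char),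
    pvFirstHit inT l = some (i, t) → t ∈ pvTags inT ∧ i < l.length := by
  intro l
  induction l with
  | nil => intro i t h; simp [pvFirstHit] at h
  | cons c ls ih =>
    intro i t h
    rw [pvFirstHit] at h
    cases hf : (pvTags inT).find? (fun t => PySem.Chars.startswith (c :: ls) t) with
    | some u =>
      rw [hf] at h
      simp only [Option.some.injEq, Prod.mk.injEq] at h
      obtain ⟨h1, h2⟩ := h
      subst h2; subst h1
      exact ⟨List.mem_of_find?_eq_some hf, by simp⟩
    | none =>
      rw [hf] at h
      simp only [Option.map_eq_some_iff] at h
      obtain ⟨⟨j, u⟩, hj, he⟩ := h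
      simp only [Prod.mk.injEq] at he
      obtain ⟨hi, ht⟩ := he
      subst ht
      have := ih j u hj
      simp only [List.length_cons]
      exact ⟨this.1, by omega ⟩


theorem pvFirstHit_eq (inT : Bool) (l : List Char) :
    findNextTag l (pvTags inT) (-1, none) =
      (match pvFirstHit inT l with
       | none => ((-1 : Int), (none : Option (List Char)))
       | some (i, t) => ((i : Int), some t)) := by
  obtain ⟨t1, t2, hT, h1, h2⟩ : ∃ t1 t2, pvTags inT = [t1, t2] ∧ t1 ≠ [] ∧ t2 ≠ [] := by
    cases inT <;> exact ⟨_, _, rfl, by decide, by decide⟩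
  rw [hT, pvFindNextTag_pair]
  induction l with
  | nil =>
    rw [pvFind_nil_of_ne t1 h1, pvFind_nil_of_ne t2 h2]
    simp [pvFirstHit]
  | cons c ls ih =>
    have hb1 := PySem.Chars.neg_one_le_find ls t1
    have hb2 := PySem.Chars.neg_one_le_find ls t2
    rw [pvFind_cons c ls t1, pvFind_cons c ls t2]
    simp only [pvFirstHit, hT]
    by_cases hp1 : t1.isPrefixOf (c :: ls) <;> by_cases hp2 : t2.isPrefixOf (c :: ls) <;>
      simp only [List.find?, PySem.Chars.startswith, hp1, hp2]
    · split_ifs <;> first | contradiction | omega | simp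
    · split_ifs <;> first | contradiction | omega | simp
    · split_ifs <;> first | contradiction | omega | simp
    · cases hls : pvFirstHit inT ls with
      | none =>
        rw [hls] at ih
        split_ifs at ih with hA hB hC <;>
          simp only [Prod.mk.injEq, reduceCtorEq, and_false] at ih
        simp only [Option.map_none]
        split_ifs <;> first | contradiction | omega | simp
      | some p =>
        obtain ⟨j, u⟩ := p
        rw [hls] at ih
        simp only [Option.map_some]
        split_ifs at ih with hA hB hC
        · exact absurd ih (by simp)
        · simp only [Prod.mk.injEq, Option.some.injEq] at ih
          obtain ⟨hij, rfl⟩ := ih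
          split_ifs <;> first | (exfalso; omega) | (simp only [Prod.mk.injEq]; exact ⟨by push_cast; omega, by simp⟩)
        · simp only [Prod.mk.injEq, Option.some.injEq] at ih
          obtain ⟨hij, rfl⟩ := ih
          obtain ⟨hC1, hC2⟩ := hC
          split_ifs <;> first | (exfalso; omega) | (simp only [Prod.mk.injEq]; exact ⟨by push_cast; omega, by simp⟩)
        · simp only [Prod.mk.injEq, Option.some.injEq] at ih
          obtain ⟨hij, rfl⟩ := ih
          split_ifs <;> first | (exfalso; omega) | (simp only [Prod.mk.injEq]; exact ⟨by push_cast; omega, by simp⟩)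

theorem pvScan_walk (inT : Bool) : ∀ (l d acc : List Char) (segs : List (String × String)),
    scanB acc segs inT d l =
      (match pvFirstHit inT l with
       | none => tailFinish segs inT (acc ++ d)
       | some (i, tag) =>
         scanB [] (if acc ++ d.take i ≠ [] then segs ++ [(pvLabel inT, String.ofList (acc ++ d.take i))] else segs)
           (!inT) (d.drop (i + tag.length)) (l.drop (i + tag.length))) := by
  intro l
  induction l with
  | nil =>
    intro d acc segs
    rw [scanB.eq_def]
    simp [pvFirstHit]
  | cons c ls ih =>
    intro d acc segs
    rw [scanB.eq_def]
    simp only [pvFirstHit]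
    cases hf : (pvTags inT).find? (fun t => PySem.Chars.startswith (c :: ls) t) with
    | some tag =>
      simp
    | none =>
      cases hls : pvFirstHit inT ls with
      | none =>
        simp only [Option.map_none]
        rw [ih]
        rw [hls]
        simp only [List.append_assoc, List.take_append_drop]
      | some p =>
        obtain ⟨i, tag⟩ := p
        simp only [Option.map_some]
        rw [ih]
        rw [hls]
        simp only []
        have e1 : (acc ++ d.take 1) ++ (d.drop 1).take i = acc ++ d.take (i + 1) := by
          rw [List.append_assoc, ← List.take_add]
          congr 2
          omega
        have e2 : (d.drop 1).drop (i + tag.length) = d.drop (i + 1 + tag.length) := by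
          rw [List.drop_drop]
          congr 1
          omega
        have e3 : ls.drop (i + tag.length) = (c :: ls).drop (i + 1 + tag.length) := by
          have : i + 1 + tag.length = (i + tag.length) + 1 := by omega
          rw [this, List.drop_succ_cons]
        rw [e1, e2, e3]

theorem pvMain (n : Nat) : ∀ (l d : List Char) (segs : List (String × String)) (inT : Bool),
    l.length = d.length → l.length ≤ n →
    loopA segs inT d l = scanB [] segs inT d l := by
  induction n with
  | zero =>
    intro l d segs inT hlen hle
    have hl : l = [] := by cases l <;> simp_all
    subst hl
    have hd : d = [] := by cases d <;> simp_all
    subst hd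
    rw [pvScan_walk, loopA.eq_def]
    have hE := pvFirstHit_eq inT []
    simp only [pvFirstHit] at hE ⊢
    simp only [hE]
    simp [tailFinish]
  | succ n ihn =>
    intro l d segs inT hlen hle
    rw [pvScan_walk, loopA.eq_def]
    have hE := pvFirstHit_eq inT l
    cases hfh : pvFirstHit inT l with
    | none =>
      rw [hfh] at hE
      simp only [hE]
      simp [tailFinish]
    | some p =>
      obtain ⟨i, tag⟩ := p
      rw [hfh] at hE
      simp only [hE]
      have hspec := pvFirstHit_spec inT l i tag hfh
      have htl := pvTags_len hspec.1
      have hidx : ((i : Int)) ≠ -1 := by omega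
      rw [dif_neg hidx]
      have h1 : (findNextTag l (pvTags inT) (-1, none)).1 = (i : Int) := by rw [hE]
      have h2 : (findNextTag l (pvTags inT) (-1, none)).2 = some tag := by rw [hE]
      have hlt : i < d.length := hlen ▸ hspec.2
      split
      next x found hrA tg hrB heq1 heq2 =>
        rw [h2] at heq1
        injection heq1 with h3
        subst h3
        simp only [Int.toNat_natCast]
        have hemit : (if (0 : Int) < (i : Int) then segs ++ [(pvLabel inT, String.ofList (d.take i))] else segs)
            = (if [] ++ d.take i ≠ [] then segs ++ [(pvLabel inT, String.ofList ([] ++ d.take i))] else segs) := by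
          simp only [List.nil_append, ne_eq, List.take_eq_nil_iff]
          have hdne : d ≠ [] := by intro h; subst h; simp at hlt
          have hiff : (0:Int) < (i : Int) ↔ ¬(i = 0 ∨ d = []) := by
            constructor
            · intro h hor
              rcases hor with h0 | hd
              · omega
              · exact hdne hd
            · intro h
              rcases Nat.eq_zero_or_pos i with h0 | hp
              · exact absurd (Or.inl h0) h
              · omega
          exact if_congr hiff rfl rfl
        rw [hemit]
        apply ihn <;> simp only [List.length_drop] <;> omega
      next x found hrA hrB heq1 heq2 =>
        rw [h2] at heq1
        exact absurd heq1 (by simp)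

-- ===== VERDICT (by name: the statement is the Claim_ definition above) =====
theorem split_thinking_tags_py_spec : Claim_equal_split_thinking_tags_py := by
  intro text inT pending _
  unfold Spec_split_thinking_tags_py split_thinking_tags_py split_thinking_tags_py_alt
  by_cases hd : (pending.toList ++ text.toList).isEmpty
  · have hnil : pending.toList ++ text.toList = [] := List.isEmpty_iff.mp hd
    simp only [hnil]
    rw [scanB.eq_def]
    simp [PySem.Chars.lower, tailFinish]
  · simp only [hd, if_false, Bool.false_eq_true]
    exact pvMain (PySem.Chars.lower (pending.toList ++ text.toList)).length
      (PySem.Chars.lower (pending.toList ++ text.toList)) (pending.toList ++ text.toList) [] inT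
      (by simp [PySem.Chars.lower]) (by omega)
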